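-- pv_equiv track=rewrite | github.com/sion9262/TIL | algorithm/자료구조(스택큐해쉬힙)/응급실.py | solve
-- ===== SOURCE A (Python) =====
-- def solve(n, m, risks):
--
--     answer = 0
--     risks = [(risk, i) for i, risk in enumerate(risks)]
--
--     while risks:
--         answer += 1
--         maxNum = max(risks)
--
--         while risks:
--             risk = risks.pop(0)
--             if risk[0] == maxNum[0]:
--                 if risk[1] == m:
--                     return answer
--                 else:
--                     break
--             else:
--                 risks.append(risk)
--
--     return answer
-- ===== SOURCE B (Python) =====
-- def solve(n, m, risks):
--     # treatment turn of patient m: serve risk levels in decreasing order, keeping only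
--     # the circular pointer (index of the last treated patient) between levels
--     if not (0 <= m < len(risks)):
--         return len(risks)  # no such patient: the whole queue drains, one patient per round
--     rm = risks[m]
--     buckets = {}
--     for i, r in enumerate(risks):
--         buckets.setdefault(r, []).append(i)
--     answer = 0
--     last = len(risks) - 1
--     for level in sorted(buckets, reverse=True):
--         S = buckets[level]
--         if rm < level:
--             answer += len(S)
--             c = [i for i in S if i <= last]
--             last = c[-1] if c else S[-1]
--         else:
--             if last < m:
--                 return answer + sum(1 for i in S if last < i <= m)
--             return answer + sum(1 for i in S if last < i) + sum(1 for i in S if i <= m)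
-- ===== Notes on version B (the rewrite author's own statement) =====
-- stated objective: faster
-- what changed: A simulates the queue patient by patient with pop(0)/append and a full max() rescan per round; B buckets patient indices by risk level once, walks the distinct levels in decreasing order and, carrying only the index of the last-treated patient (the circular pointer), adds whole-level counts and finishes patient m's level with two filtered counts (if m is not a valid index it returns len(risks), the number of rounds A's queue takes to drain).
import Mathlib
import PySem

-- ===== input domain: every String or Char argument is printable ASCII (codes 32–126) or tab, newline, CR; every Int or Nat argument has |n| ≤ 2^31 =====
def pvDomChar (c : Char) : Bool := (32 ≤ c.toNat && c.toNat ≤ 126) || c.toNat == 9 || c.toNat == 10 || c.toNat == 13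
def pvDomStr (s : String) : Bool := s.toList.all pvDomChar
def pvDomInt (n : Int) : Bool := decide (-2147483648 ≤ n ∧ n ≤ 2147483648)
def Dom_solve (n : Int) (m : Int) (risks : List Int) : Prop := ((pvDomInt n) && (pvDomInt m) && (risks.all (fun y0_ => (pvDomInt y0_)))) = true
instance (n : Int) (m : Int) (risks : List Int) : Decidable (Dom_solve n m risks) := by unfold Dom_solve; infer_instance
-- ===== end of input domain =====

-- B replaces A's O(n^2) pop/append simulation of the priority queue by one pass over the
-- risk levels in decreasing order, carrying only the circular pointer between levels (faster).

-- ===== PORT A =====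
-- inner 'while risks:' loop: pop the front; re-append a non-max-risk patient; at the first
-- max-risk patient either return (none = 'return answer') or break with the remaining queue.
-- fuel = queue length is enough: the loop breaks at the latest at the max element.
def innerA (fuel : Nat) (q : List (Int × Int)) (mxRisk m : Int) : Option (List (Int × Int)) :=
  match fuel with
  | 0 => some q
  | fuel + 1 =>
    match q with
    | [] => some []
    | x :: rest =>
      if x.1 = mxRisk then (if x.2 = m then none else some rest)
      else innerA fuel (rest ++ [x]) mxRisk m

-- outer 'while risks:' loop; each round removes exactly one patient, so fuel = initial length.
def outerA (fuel : Nat) (q : List (Int × Int)) (m : Int) (answer : Int) : Int :=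
  match fuel with
  | 0 => answer
  | fuel + 1 =>
    if q = [] then answer
    else
      match PySem.List.max2? q (fun y => y.1) (fun y => y.2) with   -- max(risks) on (risk, i) tuples
      | none => answer + 1
      | some mx =>
        match innerA q.length q mx.1 m with
        | none => answer + 1
        | some q' => outerA fuel q' m (answer + 1)

def solve (n : Int) (m : Int) (risks : List Int) : Int :=
  outerA risks.length ((PySem.List.enumerate risks).map (fun p => (p.2, p.1))) m 0

-- ===== PORT B =====
-- 'c[-1] if c else S[-1]' for c = [i for i in S if i <= last]; S is a nonempty bucket,
-- so the 0 default of getLastD is never read on admitted inputs.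
def endPtrB (S : List Int) (last : Int) : Int :=
  match (S.filter (fun i => decide (i ≤ last))).getLast? with
  | some v => v
  | none => S.getLastD 0

-- 'for level in sorted(buckets, reverse=True):' with accumulators (answer, last)
def loopB (levels : List Int) (buckets : PySem.Dict Int (List Int))
    (rm m answer last : Int) : Int :=
  match levels with
  | [] => answer
  | level :: ks =>
    if rm < level then
      loopB ks buckets rm m (answer + (buckets.getD level []).length)
        (endPtrB (buckets.getD level []) last)
    else
      if last < m then
        answer + (((buckets.getD level []).filter (fun i => decide (last < i ∧ i ≤ m))).length : Int)
      else
        answer + (((buckets.getD level []).filter (fun i => decide (last < i))).length : Int)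
               + (((buckets.getD level []).filter (fun i => decide (i ≤ m))).length : Int)

-- 'buckets.setdefault(r, []).append(i)' over 'enumerate(risks)'
def bucketsB (risks : List Int) : PySem.Dict Int (List Int) :=
  (PySem.List.enumerate risks).foldl
    (fun d p => d.modify p.2 [] (fun l => l ++ [p.1])) PySem.Dict.empty

def solve_alt (n : Int) (m : Int) (risks : List Int) : Int :=
  if 0 ≤ m ∧ m < (risks.length : Int) then
    loopB (PySem.List.sorted (bucketsB risks).keys (fun x => x) true) (bucketsB risks)
      ((PySem.List.pyGet? risks m).getD 0)   -- rm = risks[m]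
      m 0 (risks.length - 1)
  else
    risks.length   -- no such patient: the whole queue drains, one patient per round

-- ===== PRECONDITION & SPEC =====
def Spec_solve (n : Int) (m : Int) (risks : List Int) (out : Int) : Prop := out = solve_alt n m risks
instance (n : Int) (m : Int) (risks : List Int) (out : Int) : Decidable (Spec_solve n m risks out) := by
  unfold Spec_solve; infer_instance

-- ===== CLAIM (what is proved, stated in full; the proofs are below) =====
def Claim_equal_solve : Prop := ∀ (n : Int) (m : Int) (risks : List Int), Dom_solve n m risks → Spec_solve n m risks (solve n m risks)

-- ===== LEMMAS AND PROOFS =====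

-- "p is served before q" in the circular order that starts right after index c
def relI (c p q : Int) : Prop :=
  (c < p ∧ c < q ∧ p < q) ∨ (p ≤ c ∧ q ≤ c ∧ p < q) ∨ (c < p ∧ q ≤ c)

def relC (c : Int) (a b : Int × Int) : Prop := relI c a.2 b.2

-- the remaining patients (risk, idx), sorted by idx, rotated to start right after index c
def rotA (c : Int) (R : List (Int × Int)) : List (Int × Int) :=
  R.filter (fun y => decide (c < y.2)) ++ R.filter (fun y => !decide (c < y.2))

theorem rot_perm (c : Int) (R : List (Int × Int)) : (rotA c R).Perm R :=
  List.filter_append_perm _ R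

def maxRisk (R : List (Int × Int)) : Int :=
  match R with
  | [] => 0
  | x :: t => t.foldl (fun a y => max a y.1) x.1

-- number of rounds A takes until patient m is treated (abstract service process)
def count (R : List (Int × Int)) (last m : Int) : Int :=
  match h : (rotA last R).dropWhile (fun y => y.1 != maxRisk R) with
  | [] => 0
  | x :: _ =>
    if x.2 = m then 1
    else 1 + count (R.erase x) x.2 m
termination_by R.length
decreasing_by
  have hx : x ∈ rotA last R :=
    (List.dropWhile_sublist _).mem (h ▸ List.mem_cons_self)
  have hxR : x ∈ R := (rot_perm last R).mem_iff.mp hx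
  have := List.length_erase_of_mem hxR
  have : 0 < R.length := List.length_pos_of_mem hxR
  omega

def sortedIdx (R : List (Int × Int)) : Prop := R.Pairwise (fun a b => a.2 < b.2)

theorem count_nil (last m : Int) : count [] last m = 0 := by
  rw [count]; simp [rotA]

theorem sortedIdx_nodup {R : List (Int × Int)} (h : sortedIdx R) : R.Nodup := by
  exact h.imp (fun hlt => by intro he; subst he; omega)

theorem foldl_max_map1 (t : List (Int × Int)) (a : Int) :
    t.foldl (fun a y => max a y.1) a = (t.map (·.1)).foldl max a := by
  rw [List.foldl_map]

theorem maxRisk_le {R : List (Int × Int)} : ∀ y ∈ R, y.1 ≤ maxRisk R := by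
  match R with
  | [] => intro y hy; cases hy
  | x :: t =>
    intro y hy
    rw [maxRisk, foldl_max_map1]
    rcases List.mem_cons.mp hy with h | h
    · subst h; exact (PySem.List.le_foldl_max _ _).1
    · exact (PySem.List.le_foldl_max _ _).2 _ (List.mem_map_of_mem h)

theorem maxRisk_mem {R : List (Int × Int)} (h : R ≠ []) : ∃ y ∈ R, y.1 = maxRisk R := by
  match R with
  | [] => exact absurd rfl h
  | x :: t =>
    rw [maxRisk, foldl_max_map1]
    rcases PySem.List.foldl_max_mem (t.map (·.1)) x.1 with h1 | h1
    · exact ⟨x, List.mem_cons_self, h1.symm⟩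
    · rcases List.mem_map.mp h1 with ⟨y, hy, hy1⟩
      exact ⟨y, List.mem_cons_of_mem _ hy, hy1⟩

def m2step (acc : Option (Int × Int)) (x : Int × Int) : Option (Int × Int) :=
  match acc with
  | none => some x
  | some m => if (decide (m.1 < x.1) || !decide (x.1 < m.1) && decide (m.2 < x.2)) then some x else some m

theorem max2?_eq (q : List (Int × Int)) :
    PySem.List.max2? q (fun y => y.1) (fun y => y.2) = q.foldl m2step none := by
  rw [PySem.List.max2?]
  congr 1
  funext acc x
  cases acc <;> rfl

theorem max2?_spec {q : List (Int × Int)} {mx : Int × Int}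
    (h : PySem.List.max2? q (fun y => y.1) (fun y => y.2) = some mx) :
    mx ∈ q ∧ ∀ y ∈ q, y.1 ≤ mx.1 := by
  have aux : ∀ (q : List (Int × Int)) (a : Int × Int),
      ∃ mx, q.foldl m2step (some a) = some mx ∧ (mx = a ∨ mx ∈ q) ∧ a.1 ≤ mx.1 ∧
        ∀ y ∈ q, y.1 ≤ mx.1 := by
    intro q
    induction q with
    | nil => intro a; exact ⟨a, rfl, Or.inl rfl, le_refl _, by simp⟩
    | cons x t ih =>
      intro a
      simp only [List.foldl_cons]
      by_cases hc : (decide (a.1 < x.1) || !decide (x.1 < a.1) && decide (a.2 < x.2)) = true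
      · have hstep : m2step (some a) x = some x := by simp [m2step, hc]
        rw [hstep]
        rcases ih x with ⟨mx, h1, h2, h3, h4⟩
        refine ⟨mx, h1, ?_, ?_, ?_⟩
        · rcases h2 with h | h
          · exact Or.inr (h ▸ List.mem_cons_self)
          · exact Or.inr (List.mem_cons_of_mem _ h)
        · simp only [Bool.or_eq_true, Bool.and_eq_true, decide_eq_true_eq, Bool.not_eq_eq_eq_not,
            Bool.not_true, decide_eq_false_iff_not, not_lt] at hc
          rcases hc with h | ⟨h, _⟩ <;> omega
        · intro y hy
          rcases List.mem_cons.mp hy with h | h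
          · exact h ▸ h3
          · exact h4 y h
      · have hstep : m2step (some a) x = some a := by simp [m2step, hc]
        rw [hstep]
        rcases ih a with ⟨mx, h1, h2, h3, h4⟩
        refine ⟨mx, h1, ?_, h3, ?_⟩
        · rcases h2 with h | h
          · exact Or.inl h
          · exact Or.inr (List.mem_cons_of_mem _ h)
        · intro y hy
          rcases List.mem_cons.mp hy with hh | hh
          · subst hh
            simp only [Bool.or_eq_true, Bool.and_eq_true, decide_eq_true_eq, Bool.not_eq_eq_eq_not,
              Bool.not_true, decide_eq_false_iff_not, not_lt] at hc
            push_neg at hc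
            omega
          · exact h4 y hh
  match q with
  | [] => simp [PySem.List.max2?] at h
  | x :: t =>
    rw [max2?_eq, List.foldl_cons] at h
    have hstep : m2step none x = some x := rfl
    rw [hstep] at h
    rcases aux t x with ⟨mx', h1, h2, h3, h4⟩
    rw [h1] at h
    cases h
    refine ⟨?_, ?_⟩
    · rcases h2 with h | h
      · exact h ▸ List.mem_cons_self
      · exact List.mem_cons_of_mem _ h
    · intro y hy
      rcases List.mem_cons.mp hy with h | h
      · exact h ▸ h3
      · exact h4 y h

theorem max2?_ne_none {q : List (Int × Int)} (h : q ≠ []) :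
    PySem.List.max2? q (fun y => y.1) (fun y => y.2) ≠ none := by
  match q with
  | x :: t =>
    rw [max2?_eq, List.foldl_cons]
    have hstep : m2step none x = some x := rfl
    rw [hstep]
    have aux : ∀ (t : List (Int × Int)) (a : Int × Int), t.foldl m2step (some a) ≠ none := by
      intro t
      induction t with
      | nil => intro a h; cases h
      | cons x t ih =>
        intro a
        simp only [List.foldl_cons, m2step]
        split <;> apply ih
    exact aux t x

theorem rot_pairwise {R : List (Int × Int)} (h : sortedIdx R) (c : Int) :
    (rotA c R).Pairwise (relC c) := by
  rw [rotA, List.pairwise_append]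
  refine ⟨?_, ?_, ?_⟩
  · refine (h.filter _).imp_of_mem ?_
    intro a b ha hb hab
    have ha' := (List.mem_filter.mp ha).2
    have hb' := (List.mem_filter.mp hb).2
    simp only [decide_eq_true_eq] at ha' hb'
    exact Or.inl ⟨ha', hb', hab⟩
  · refine (h.filter _).imp_of_mem ?_
    intro a b ha hb hab
    have ha' := (List.mem_filter.mp ha).2
    have hb' := (List.mem_filter.mp hb).2
    simp only [Bool.not_eq_eq_eq_not, Bool.not_true, decide_eq_false_iff_not, not_lt] at ha' hb'
    exact Or.inr (Or.inl ⟨ha', hb', hab⟩)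
  · intro a ha b hb
    have ha' := (List.mem_filter.mp ha).2
    have hb' := (List.mem_filter.mp hb).2
    simp only [Bool.not_eq_eq_eq_not, Bool.not_true, decide_eq_false_iff_not, not_lt,
      decide_eq_true_eq] at ha' hb'
    exact Or.inr (Or.inr ⟨ha', hb'⟩)

theorem rel_uniq {c : Int} {l₁ l₂ : List (Int × Int)} (hp : l₁.Perm l₂)
    (h₁ : l₁.Pairwise (relC c)) (h₂ : l₂.Pairwise (relC c)) : l₁ = l₂ := by
  refine List.eq_of_perm_of_sorted ?_ h₁ h₂ hp
  intro a b _ _ hab hba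
  exfalso
  unfold relC relI at hab hba
  omega

theorem count_cons {R : List (Int × Int)} {last m : Int} {x : Int × Int} {v : List (Int × Int)}
    (hd : (rotA last R).dropWhile (fun y => y.1 != maxRisk R) = x :: v) :
    count R last m = if x.2 = m then 1 else 1 + count (R.erase x) x.2 m := by
  rw [count]
  split
  · rename_i h
    rw [hd] at h
    cases h
  · rename_i x' t h
    have hxx : x :: v = x' :: t := hd.symm.trans h
    cases hxx
    rfl

-- the first max-risk patient in the rotated queue
theorem first_decomp {R : List (Int × Int)} (hs : sortedIdx R) (hne : R ≠ []) (last : Int) :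
    ∃ u x v,
      (rotA last R).dropWhile (fun y => y.1 != maxRisk R) = x :: v ∧
      rotA last R = u ++ x :: v ∧
      (∀ y ∈ u, y.1 ≠ maxRisk R) ∧
      x.1 = maxRisk R ∧ x ∈ R ∧
      (∀ y ∈ R, y.1 = maxRisk R → y = x ∨ relC last x y) ∧
      v ++ u = rotA x.2 (R.erase x) := by
  have hqp : (rotA last R).Perm R := rot_perm last R
  have hpw : (rotA last R).Pairwise (relC last) := rot_pairwise hs last
  obtain ⟨y0, hy0R, hy0M⟩ := maxRisk_mem hne
  have hy0q : y0 ∈ rotA last R := hqp.mem_iff.mpr hy0R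
  have hdnil : (rotA last R).dropWhile (fun y => y.1 != maxRisk R) ≠ [] := by
    intro hh
    have := List.dropWhile_eq_nil_iff.mp hh y0 hy0q
    simp [hy0M] at this
  obtain ⟨x, v, hd⟩ : ∃ x v, (rotA last R).dropWhile (fun y => y.1 != maxRisk R) = x :: v := by
    cases hcase : (rotA last R).dropWhile (fun y => y.1 != maxRisk R) with
    | nil => exact absurd hcase hdnil
    | cons a b => exact ⟨a, b, rfl⟩
  have hxM : x.1 = maxRisk R := by
    have hh := List.head_dropWhile_not (fun y : Int × Int => y.1 != maxRisk R) hdnil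
    simp only [hd, List.head_cons] at hh
    simpa using hh
  have hxq : x ∈ rotA last R := (List.dropWhile_sublist _).mem (hd ▸ List.mem_cons_self)
  have hxR : x ∈ R := hqp.mem_iff.mp hxq
  obtain ⟨u, hsplit, hu⟩ :
      ∃ u, rotA last R = u ++ x :: v ∧ ∀ y ∈ u, y.1 ≠ maxRisk R := by
    refine ⟨(rotA last R).takeWhile (fun y => y.1 != maxRisk R), ?_, ?_⟩
    · rw [← hd]; exact (List.takeWhile_append_dropWhile).symm
    · intro y hy
      have := List.mem_takeWhile_imp hy
      simpa using this
  obtain ⟨hpu, hpcons, hcross⟩ := List.pairwise_append.mp (hsplit ▸ hpw)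
  obtain ⟨hxv', hpv⟩ := List.pairwise_cons.mp hpcons
  have hbx : ∀ b ∈ u, relC last b x := fun b hb => hcross b hb x List.mem_cons_self
  have hxu : x ∉ u := fun hh => hu x hh hxM
  refine ⟨u, x, v, hd, hsplit, hu, hxM, hxR, ?_, ?_⟩
  · intro y hyR hyM
    by_cases hxy : y = x
    · exact Or.inl hxy
    · right
      have hyq : y ∈ rotA last R := hqp.mem_iff.mpr hyR
      rcases List.mem_append.mp (hsplit ▸ hyq) with hu' | hxv
      · exact absurd hyM (hu y hu')
      · rcases List.mem_cons.mp hxv with h | h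
        · exact absurd h hxy
        · exact hxv' y h
  · -- the queue after serving x is the rotation starting right after x
    have hqe : (rotA last R).erase x = u ++ v := by
      rw [hsplit, List.erase_append_right _ hxu, List.erase_cons_head]
    have hperm : (v ++ u).Perm (R.erase x) :=
      List.perm_append_comm.trans (hqe ▸ (hqp.erase x))
    have hpw2 : (rotA x.2 (R.erase x)).Pairwise (relC x.2) :=
      rot_pairwise (List.Pairwise.erase x hs) x.2
    have hpw1 : (v ++ u).Pairwise (relC x.2) := by
      rw [List.pairwise_append]
      refine ⟨?_, ?_, ?_⟩
      · refine hpv.imp_of_mem ?_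
        intro a b ha hb hab
        have h1 := hxv' a ha
        have h2 := hxv' b hb
        unfold relC relI at h1 h2 hab ⊢
        omega
      · refine hpu.imp_of_mem ?_
        intro a b ha hb hab
        have h1 := hbx a ha
        have h2 := hbx b hb
        unfold relC relI at h1 h2 hab ⊢
        omega
      · intro a ha b hb
        have h1 := hxv' a ha
        have h2 := hbx b hb
        have h3 := hcross b hb a (List.mem_cons_of_mem _ ha)
        unfold relC relI at h1 h2 h3 ⊢
        omega
    exact rel_uniq (hperm.trans (rot_perm x.2 (R.erase x)).symm) hpw1 hpw2

theorem innerA_spec : ∀ (u : List (Int × Int)) (fuel : Nat) (x : Int × Int)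
    (v : List (Int × Int)) (M m : Int), u.length < fuel →
    (∀ y ∈ u, y.1 ≠ M) → x.1 = M →
    innerA fuel (u ++ x :: v) M m = if x.2 = m then none else some (v ++ u) := by
  intro u
  induction u with
  | nil =>
    intro fuel x v M m hf hu hx
    cases fuel with
    | zero => exact absurd hf (by simp)
    | succ fuel =>
      simp only [List.nil_append, innerA, if_pos hx]
      split <;> simp
  | cons y u ih =>
    intro fuel x v M m hf hu hx
    cases fuel with
    | zero => exact absurd hf (by simp)
    | succ fuel =>
      have hy : y.1 ≠ M := hu y List.mem_cons_self
      simp only [List.cons_append, innerA, if_neg hy]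
      rw [show (u ++ x :: v) ++ [y] = u ++ x :: (v ++ [y]) by simp]
      rw [ih fuel x (v ++ [y]) M m (by simp only [List.length_cons] at hf; omega)
        (fun z hz => hu z (List.mem_cons_of_mem _ hz)) hx]
      split <;> simp

-- A's simulation computes `count`
theorem outerA_count : ∀ (fuel : Nat) (R : List (Int × Int)), R.length ≤ fuel →
    sortedIdx R → ∀ (last m a : Int),
    outerA fuel (rotA last R) m a = a + count R last m := by
  intro fuel
  induction fuel with
  | zero =>
    intro R hf hs last m a
    have hR : R = [] := List.eq_nil_of_length_eq_zero (by omega)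
    subst hR
    rw [count_nil]
    simp [rotA, outerA]
  | succ fuel ih =>
    intro R hf hs last m a
    by_cases hR : R = []
    · subst hR
      rw [count_nil]
      simp [rotA, outerA]
    · have hqne : rotA last R ≠ [] := by
        intro hh
        have h2 := (rot_perm last R).symm
        rw [hh] at h2
        exact hR h2.eq_nil
      obtain ⟨u, x, v, hd, hsplit, hu, hxM, hxR, hfirst, hrot⟩ := first_decomp hs hR last
      have hcnt := count_cons (last := last) (m := m) hd
      obtain ⟨mx, hmx⟩ : ∃ mx, PySem.List.max2? (rotA last R) (fun y => y.1) (fun y => y.2)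
          = some mx := by
        cases hcase : PySem.List.max2? (rotA last R) (fun y => y.1) (fun y => y.2) with
        | none => exact absurd hcase (max2?_ne_none hqne)
        | some mx => exact ⟨mx, rfl⟩
      rw [outerA, if_neg hqne, hmx]
      dsimp only
      obtain ⟨hmxmem, hmxmax⟩ := max2?_spec hmx
      have hmx1 : mx.1 = maxRisk R := by
        apply le_antisymm
        · exact maxRisk_le mx ((rot_perm last R).mem_iff.mp hmxmem)
        · obtain ⟨y0, hy0, hy0M⟩ := maxRisk_mem hR
          calc maxRisk R = y0.1 := hy0M.symm
            _ ≤ mx.1 := hmxmax y0 ((rot_perm last R).mem_iff.mpr hy0)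
      have hinner : innerA (rotA last R).length (rotA last R) mx.1 m =
        if x.2 = m then none else some (v ++ u) := by
        rw [hmx1]
        conv_lhs => rw [hsplit]
        exact innerA_spec u _ x v _ m (by simp only [List.length_append, List.length_cons]; omega) hu hxM
      by_cases hm : x.2 = m
      · rw [hinner, if_pos hm]
        dsimp only
        rw [hcnt, if_pos hm]
      · rw [hinner, if_neg hm]
        dsimp only
        rw [hrot]
        rw [ih (R.erase x) (by
          have := List.length_erase_of_mem hxR
          have : 0 < R.length := List.length_pos_of_mem hxR
          omega) (List.Pairwise.erase x hs) x.2 m (a + 1)]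
        rw [hcnt, if_neg hm]
        ring

-- ---- B side ----

theorem getLast?_filter_spec (p : Int → Bool) :
    ∀ (S : List Int), S.Pairwise (· < ·) →
    (∀ v, (S.filter p).getLast? = some v → v ∈ S ∧ p v = true ∧ ∀ i ∈ S, p i = true → i ≤ v) ∧
    ((S.filter p).getLast? = none → ∀ i ∈ S, ¬ p i = true) := by
  intro S
  induction S with
  | nil => exact fun _ => ⟨fun v hv => by simp at hv, fun _ i hi => by cases hi⟩
  | cons a t ih =>
    intro hp
    obtain ⟨ha, ht⟩ := List.pairwise_cons.mp hp
    obtain ⟨ih1, ih2⟩ := ih ht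
    rw [List.filter_cons]
    by_cases hpa : p a = true
    · rw [if_pos hpa]
      constructor
      · intro v hv
        rw [List.getLast?_cons] at hv
        cases hv
        cases hw : (t.filter p).getLast? with
        | some w =>
          obtain ⟨hwt, hpw, hwb⟩ := ih1 w hw
          simp only [Option.getD_some]
          refine ⟨List.mem_cons_of_mem _ hwt, hpw, ?_⟩
          intro i hi hpi
          rcases List.mem_cons.mp hi with h | h
          · subst h
            exact le_of_lt (ha w hwt)
          · exact hwb i h hpi
        | none =>
          simp only [Option.getD_none]
          refine ⟨List.mem_cons_self, hpa, ?_⟩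
          intro i hi hpi
          rcases List.mem_cons.mp hi with h | h
          · exact h.le
          · exact absurd hpi (ih2 hw i h)
      · intro hv
        rw [List.getLast?_cons] at hv
        cases hv
    · rw [if_neg hpa]
      constructor
      · intro v hv
        obtain ⟨hwt, hpw, hwb⟩ := ih1 v hv
        refine ⟨List.mem_cons_of_mem _ hwt, hpw, ?_⟩
        intro i hi hpi
        rcases List.mem_cons.mp hi with h | h
        · subst h; exact absurd hpi hpa
        · exact hwb i h hpi
      · intro hv i hi
        rcases List.mem_cons.mp hi with h | h
        · subst h; exact hpa
        · exact ih2 hv i h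

theorem getLastD_spec {S : List Int} (hS : S.Pairwise (· < ·)) (hne : S ≠ []) :
    S.getLastD 0 ∈ S ∧ ∀ i ∈ S, i ≤ S.getLastD 0 := by
  have h := (getLast?_filter_spec (fun _ => true) S hS).1
  have hfil : S.filter (fun _ => true) = S := by simp
  rw [hfil] at h
  cases hlast : S.getLast? with
  | none => exact absurd (List.getLast?_eq_none_iff.mp hlast) hne
  | some v =>
    obtain ⟨hv, _, hb⟩ := h v hlast
    have : S.getLastD 0 = v := by rw [List.getLastD_eq_getLast?, hlast]; rfl
    rw [this]
    exact ⟨hv, fun i hi => hb i hi rfl⟩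

theorem endPtrB_cases {S : List Int} (hS : S.Pairwise (· < ·)) (hne : S ≠ []) (last : Int) :
    endPtrB S last ∈ S ∧
    ((endPtrB S last ≤ last ∧ ∀ j ∈ S, j ≤ last → j ≤ endPtrB S last) ∨
     ((∀ j ∈ S, last < j) ∧ ∀ j ∈ S, j ≤ endPtrB S last)) := by
  unfold endPtrB
  cases hfil : (S.filter (fun i => decide (i ≤ last))).getLast? with
  | none =>
    have h2 := (getLast?_filter_spec (fun i => decide (i ≤ last)) S hS).2 hfil
    obtain ⟨hmem, hmax⟩ := getLastD_spec hS hne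
    refine ⟨hmem, Or.inr ⟨?_, hmax⟩⟩
    intro j hj
    have := h2 j hj
    simp at this
    omega
  | some v =>
    obtain ⟨hv, hpv, hb⟩ := (getLast?_filter_spec (fun i => decide (i ≤ last)) S hS).1 v hfil
    simp only [decide_eq_true_eq] at hpv
    refine ⟨hv, Or.inl ⟨hpv, ?_⟩⟩
    intro j hj hjl
    exact hb j hj (by simpa using hjl)

theorem endPtr_chain {S : List Int} {a last : Int} (hS : S.Pairwise (· < ·))
    (ha : a ∈ S) (hfirst : ∀ i ∈ S, i ≠ a → relI last a i)
    (h2 : ∃ i ∈ S, i ≠ a) :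
    endPtrB (S.filter (fun i => i != a)) a = endPtrB S last := by
  obtain ⟨w, hwS, hwa⟩ := h2
  have hS' : (S.filter (fun i => i != a)).Pairwise (· < ·) := hS.filter _
  have hne' : S.filter (fun i => i != a) ≠ [] := by
    intro hh
    have := List.filter_eq_nil_iff.mp hh w hwS
    simp [hwa] at this
  obtain ⟨he1S', hc1⟩ := endPtrB_cases hS' hne' a
  obtain ⟨he2S, hc2⟩ := endPtrB_cases hS (List.ne_nil_of_mem ha) last
  set e1 := endPtrB (S.filter (fun i => i != a)) a with he1def
  set e2 := endPtrB S last with he2def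
  have he1S : e1 ∈ S ∧ e1 ≠ a := by
    have := List.mem_filter.mp he1S'
    simpa using this
  have hf1 : relI last a e1 := hfirst e1 he1S.1 he1S.2
  have hfw : relI last a w := hfirst w hwS hwa
  have he2a : e2 ≠ a := by
    intro hh
    rcases hc2 with ⟨h21, h22⟩ | ⟨h21, h22⟩
    · have hi := h22 w hwS
      have hia := h22 a ha
      unfold relI at hfw
      omega
    · have hi := h22 w hwS
      have hia := h21 a ha
      have hiw := h21 w hwS
      unfold relI at hfw
      omega
  have he2S' : e2 ∈ S.filter (fun i => i != a) := List.mem_filter.mpr ⟨he2S, by simp [he2a]⟩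
  have hf2 : relI last a e2 := hfirst e2 he2S he2a
  unfold relI at hf1 hf2
  rcases hc1 with ⟨h11, h12⟩ | ⟨h11, h12⟩ <;> rcases hc2 with ⟨h21, h22⟩ | ⟨h21, h22⟩
  · have i1 := h12 e2 he2S'
    have i2 := h22 e1 he1S.1
    have i3 := h22 a ha
    omega
  · have i1 := h12 e2 he2S'
    have i2 := h21 e1 he1S.1
    have i2a := h21 a ha
    have i3 := h22 e1 he1S.1
    have i3a := h22 a ha
    have i4 := h21 e2 he2S
    omega
  · have i1 := h11 e2 he2S'
    have i2 := h12 e2 he2S'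
    have i3 := h22 e1 he1S.1
    have i4 := h22 a ha
    omega
  · have i1 := h11 e2 he2S'
    have i2 := h12 e2 he2S'
    have i3 := h21 e1 he1S.1
    have i3a := h21 a ha
    have i4 := h22 e1 he1S.1
    have i4a := h22 a ha
    omega

theorem idx_inj {R : List (Int × Int)} (hs : sortedIdx R) :
    ∀ y ∈ R, ∀ z ∈ R, y.2 = z.2 → y = z := by
  induction R with
  | nil => intro y hy; cases hy
  | cons a t ih =>
    obtain ⟨ha, ht⟩ := List.pairwise_cons.mp hs
    intro y hy z hz he
    rcases List.mem_cons.mp hy with rfl | hy'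
    · rcases List.mem_cons.mp hz with rfl | hz'
      · rfl
      · have := ha z hz'; omega
    · rcases List.mem_cons.mp hz with rfl | hz'
      · have := ha y hy'; omega
      · exact ih ht y hy' z hz' he

theorem S_sorted {R : List (Int × Int)} (hs : sortedIdx R) (L : Int) :
    ((R.filter (fun y => y.1 == L)).map (·.2)).Pairwise (· < ·) :=
  List.pairwise_map.mpr (hs.filter _)

theorem S_mem {R : List (Int × Int)} {L : Int} {y : Int × Int} (hy : y ∈ R) (hyL : y.1 = L) :
    y.2 ∈ (R.filter (fun y => y.1 == L)).map (·.2) :=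
  List.mem_map.mpr ⟨y, List.mem_filter.mpr ⟨hy, by simp [hyL]⟩, rfl⟩

theorem S_erase {R : List (Int × Int)} {L : Int} {x : Int × Int}
    (hs : sortedIdx R) (hxR : x ∈ R) (hxL : x.1 = L) :
    ((R.erase x).filter (fun y => y.1 == L)).map (·.2) =
      ((R.filter (fun y => y.1 == L)).map (·.2)).filter (fun i => i != x.2) := by
  rw [List.Nodup.erase_eq_filter (sortedIdx_nodup hs), List.filter_filter, List.filter_map,
      List.filter_filter]
  refine congrArg _ (List.filter_congr ?_)
  intro y hy
  by_cases hyx : y = x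
  · subst hyx; simp
  · have hyx2 : y.2 ≠ x.2 := fun hh => hyx (idx_inj hs y hy x hxR hh)
    by_cases hyL : y.1 = L <;>
      · rw [Bool.eq_iff_iff]
        simp [bne_iff_ne, beq_iff_eq, hyx, hyx2, hyL, Function.comp]

theorem R_erase_filter {R : List (Int × Int)} {L : Int} {x : Int × Int}
    (hs : sortedIdx R) (hxL : x.1 = L) :
    (R.erase x).filter (fun y => y.1 != L) = R.filter (fun y => y.1 != L) := by
  rw [List.Nodup.erase_eq_filter (sortedIdx_nodup hs), List.filter_filter]
  refine List.filter_congr ?_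
  intro y hy
  by_cases hyL : y.1 = L
  · simp [hyL]
  · have : y ≠ x := fun hh => hyL (hh ▸ hxL)
    rw [Bool.eq_iff_iff]
    simp [bne_iff_ne, hyL, this]

theorem endPtrB_single (i last : Int) : endPtrB [i] last = i := by
  unfold endPtrB
  by_cases h : i ≤ last <;> simp [h]

-- skip one whole risk level above rm
theorem count_level (n : Nat) : ∀ {R : List (Int × Int)} {L m last : Int},
    R.length ≤ n → sortedIdx R → (∃ y ∈ R, y.1 = L) → (∀ y ∈ R, y.1 ≤ L) →
    (∀ y ∈ R, y.1 = L → y.2 ≠ m) →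
    count R last m =
      ((R.filter (fun y => y.1 == L)).map (·.2)).length +
      count (R.filter (fun y => y.1 != L))
        (endPtrB ((R.filter (fun y => y.1 == L)).map (·.2)) last) m := by
  induction n with
  | zero =>
    intro R L m last hn hs hex hub hm
    obtain ⟨y, hy, -⟩ := hex
    have := List.length_pos_of_mem hy
    omega
  | succ n ih =>
    intro R L m last hn hs hex hub hm
    have hne : R ≠ [] := by
      obtain ⟨y, hy, -⟩ := hex
      exact List.ne_nil_of_mem hy
    have hML : maxRisk R = L := by
      apply le_antisymm
      · obtain ⟨y1, hy1, hy1M⟩ := maxRisk_mem hne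
        exact hy1M ▸ hub y1 hy1
      · obtain ⟨y, hy, hyL⟩ := hex
        exact hyL ▸ maxRisk_le y hy
    obtain ⟨u, x, v, hd, hsplit, hu, hxM, hxR, hfirst, hrot⟩ := first_decomp hs hne last
    rw [hML] at hxM hfirst
    have hxm : x.2 ≠ m := hm x hxR hxM
    rw [count_cons hd, if_neg hxm]
    by_cases hone : ∀ y ∈ R, y.1 = L → y = x
    · -- x is the only patient at level L
      have herase : R.erase x = R.filter (fun y => y.1 != L) := by
        rw [List.Nodup.erase_eq_filter (sortedIdx_nodup hs)]
        refine List.filter_congr ?_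
        intro y hy
        by_cases hyL : y.1 = L
        · rw [Bool.eq_iff_iff]
          simp [hone y hy hyL, hxM]
        · have : y ≠ x := fun hh => hyL (hh ▸ hxM)
          rw [Bool.eq_iff_iff]
          simp [bne_iff_ne, hyL, this]
      have hfilx : R.filter (fun y => y.1 == L) = [x] := by
        have hxf : x ∈ R.filter (fun y => y.1 == L) :=
          List.mem_filter.mpr ⟨hxR, by simp [hxM]⟩
        have hall : ∀ y ∈ R.filter (fun y => y.1 == L), y = x := by
          intro y hy
          obtain ⟨hyR, hyL⟩ := List.mem_filter.mp hy
          exact hone y hyR (by simpa using hyL)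
        have hnd : (R.filter (fun y => y.1 == L)).Nodup :=
          (sortedIdx_nodup hs).filter _
        cases hfil : R.filter (fun y => y.1 == L) with
        | nil => rw [hfil] at hxf; cases hxf
        | cons b bt =>
          rw [hfil] at hall hnd
          have hb : b = x := hall b List.mem_cons_self
          cases bt with
          | nil => rw [hb]
          | cons c ct =>
            have hc : c = x := hall c (List.mem_cons_of_mem _ (List.mem_cons_self))
            rw [List.nodup_cons] at hnd
            exact absurd (hb.trans hc.symm ▸ List.mem_cons_self) hnd.1
      rw [herase, hfilx]
      simp only [List.map_cons, List.map_nil, List.length_cons, List.length_nil, endPtrB_single]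
      push_cast
      ring
    · push_neg at hone
      obtain ⟨y0, hy0R, hy0L, hy0x⟩ := hone
      have hlen' : (R.erase x).length ≤ n := by
        have := List.length_erase_of_mem hxR
        have := List.length_pos_of_mem hxR
        omega
      have hs' : sortedIdx (R.erase x) := List.Pairwise.erase x hs
      have hex' : ∃ y ∈ R.erase x, y.1 = L :=
        ⟨y0, (List.mem_erase_of_ne hy0x).mpr hy0R, hy0L⟩
      have hub' : ∀ y ∈ R.erase x, y.1 ≤ L := fun y hy => hub y (List.mem_of_mem_erase hy)
      have hm' : ∀ y ∈ R.erase x, y.1 = L → y.2 ≠ m :=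
        fun y hy => hm y (List.mem_of_mem_erase hy)
      rw [ih hlen' hs' hex' hub' hm']
      rw [S_erase hs hxR hxM, R_erase_filter hs hxM]
      have hy02 : y0.2 ≠ x.2 := fun hh => hy0x (idx_inj hs y0 hy0R x hxR hh)
      have hEp : endPtrB ((((R.filter (fun y => y.1 == L)).map (·.2)).filter
          (fun i => i != x.2))) x.2 = endPtrB ((R.filter (fun y => y.1 == L)).map (·.2)) last := by
        refine endPtr_chain (S_sorted hs L) (S_mem hxR hxM) ?_ ⟨y0.2, S_mem hy0R hy0L, hy02⟩
        intro i hi hix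
        obtain ⟨y, hyf, hyi⟩ := List.mem_map.mp hi
        obtain ⟨hyR, hyL⟩ := List.mem_filter.mp hyf
        have hyx : y ≠ x := fun hh => hix (hyi ▸ hh ▸ rfl)
        rcases hfirst y hyR (by simpa using hyL) with h | h
        · exact absurd h hyx
        · exact hyi ▸ h
      rw [hEp]
      have hnformula : (((R.filter (fun y => y.1 == L)).map (·.2)).filter
          (fun i => i != x.2)).length + 1 = ((R.filter (fun y => y.1 == L)).map (·.2)).length := by
        have hndS : ((R.filter (fun y => y.1 == L)).map (·.2)).Nodup :=
          (S_sorted hs L).imp (fun h => by omega)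
        rw [← List.Nodup.erase_eq_filter hndS]
        have hx2 : x.2 ∈ (R.filter (fun y => y.1 == L)).map (·.2) := S_mem hxR hxM
        have := List.length_erase_of_mem hx2
        have := List.length_pos_of_mem hx2
        omega
      push_cast [← hnformula]
      ring

-- the level of patient m itself
theorem count_final (n : Nat) : ∀ {R : List (Int × Int)} {rm m last : Int},
    R.length ≤ n → sortedIdx R → (∀ y ∈ R, y.1 ≤ rm) → (rm, m) ∈ R →
    count R last m =
      (if last < m
       then ((((R.filter (fun y => y.1 == rm)).map (·.2)).filter
               (fun i => decide (last < i ∧ i ≤ m))).length : Int)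
       else ((((R.filter (fun y => y.1 == rm)).map (·.2)).filter
               (fun i => decide (last < i))).length : Int)
          + ((((R.filter (fun y => y.1 == rm)).map (·.2)).filter
               (fun i => decide (i ≤ m))).length : Int)) := by
  induction n with
  | zero =>
    intro R rm m last hn hs hub hmem
    have := List.length_pos_of_mem hmem
    omega
  | succ n ih =>
    intro R rm m last hn hs hub hmem
    have hne : R ≠ [] := List.ne_nil_of_mem hmem
    have hML : maxRisk R = rm := by
      apply le_antisymm
      · obtain ⟨y1, hy1, hy1M⟩ := maxRisk_mem hne
        exact hy1M ▸ hub y1 hy1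
      · exact maxRisk_le (rm, m) hmem
    obtain ⟨u, x, v, hd, hsplit, hu, hxR', hxR, hfirst, hrot⟩ := first_decomp hs hne last
    rw [hML] at hxR' hfirst
    have hmS : m ∈ (R.filter (fun y => y.1 == rm)).map (·.2) := S_mem hmem rfl
    have hSx2 : x.2 ∈ (R.filter (fun y => y.1 == rm)).map (·.2) := S_mem hxR hxR'
    have hndS : ((R.filter (fun y => y.1 == rm)).map (·.2)).Nodup :=
      (S_sorted hs rm).imp (fun h => by omega)
    have hfirstS : ∀ i ∈ (R.filter (fun y => y.1 == rm)).map (·.2), i ≠ x.2 → relI last x.2 i := by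
      intro i hi hix
      obtain ⟨y, hyf, hyi⟩ := List.mem_map.mp hi
      obtain ⟨hyR, hyL⟩ := List.mem_filter.mp hyf
      have hyx : y ≠ x := fun hh => hix (hyi ▸ hh ▸ rfl)
      rcases hfirst y hyR (by simpa using hyL) with h | h
      · exact absurd h hyx
      · exact hyi ▸ h
    have hperm : ((R.filter (fun y => y.1 == rm)).map (·.2)).Perm
        (x.2 :: ((R.filter (fun y => y.1 == rm)).map (·.2)).filter (fun i => i != x.2)) := by
      have := List.perm_cons_erase hSx2
      rwa [List.Nodup.erase_eq_filter hndS] at this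
    have len_split : ∀ p : Int → Bool,
        (((R.filter (fun y => y.1 == rm)).map (·.2)).filter p).length =
        (if p x.2 = true then 1 else 0) +
        ((((R.filter (fun y => y.1 == rm)).map (·.2)).filter (fun i => i != x.2)).filter p).length := by
      intro p
      have hp := (List.Perm.filter p hperm).length_eq
      rw [List.filter_cons] at hp
      by_cases hpx : p x.2 = true
      · rw [if_pos hpx] at hp ⊢
        simp only [List.length_cons] at hp
        omega
      · rw [if_neg hpx] at hp ⊢
        omega
    have hrelS' : ∀ i ∈ ((R.filter (fun y => y.1 == rm)).map (·.2)).filter (fun i => i != x.2),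
        relI last x.2 i := by
      intro i hi
      obtain ⟨hiS, hine⟩ := List.mem_filter.mp hi
      exact hfirstS i hiS (by simpa using hine)
    by_cases hm2 : x.2 = m
    · -- patient m is served this round
      rw [count_cons hd, if_pos hm2]
      subst hm2
      by_cases hlm : last < x.2
      · rw [if_pos hlm]
        rw [len_split (fun i => decide (last < i ∧ i ≤ x.2))]
        rw [if_pos (by simp only [decide_eq_true_eq]; omega)]
        have hz : ((((R.filter (fun y => y.1 == rm)).map (·.2)).filter (fun i => i != x.2)).filter
            (fun i => decide (last < i ∧ i ≤ x.2))).length = 0 := by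
          rw [List.length_eq_zero_iff, List.filter_eq_nil_iff]
          intro i hi
          have hrel := hrelS' i hi
          unfold relI at hrel
          simp only [decide_eq_true_eq]
          omega
        rw [hz]
        omega
      · rw [if_neg hlm]
        rw [len_split (fun i => decide (last < i)), len_split (fun i => decide (i ≤ x.2))]
        rw [if_neg (by simp only [decide_eq_true_eq]; omega), if_pos (by simp only [decide_eq_true_eq]; omega)]
        have hz1 : ((((R.filter (fun y => y.1 == rm)).map (·.2)).filter (fun i => i != x.2)).filter
            (fun i => decide (last < i))).length = 0 := by
          rw [List.length_eq_zero_iff, List.filter_eq_nil_iff]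
          intro i hi
          have hrel := hrelS' i hi
          unfold relI at hrel
          simp only [decide_eq_true_eq]
          omega
        have hz2 : ((((R.filter (fun y => y.1 == rm)).map (·.2)).filter (fun i => i != x.2)).filter
            (fun i => decide (i ≤ x.2))).length = 0 := by
          rw [List.length_eq_zero_iff, List.filter_eq_nil_iff]
          intro i hi
          have hrel := hrelS' i hi
          have hine : i ≠ x.2 := by simpa using (List.mem_filter.mp hi).2
          unfold relI at hrel
          simp only [decide_eq_true_eq]
          omega
        rw [hz1, hz2]
        omega
    · -- someone else is served; recurse with the pointer moved to x.2
      rw [count_cons hd, if_neg hm2]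
      have hlen' : (R.erase x).length ≤ n := by
        have := List.length_erase_of_mem hxR
        have := List.length_pos_of_mem hxR
        omega
      have hmemne : (rm, m) ≠ x := fun hh => hm2 (by rw [← hh])
      rw [ih hlen' (List.Pairwise.erase x hs)
        (fun y hy => hub y (List.mem_of_mem_erase hy))
        ((List.mem_erase_of_ne hmemne).mpr hmem)]
      rw [S_erase hs hxR hxR']
      have hfm : relI last x.2 m := hfirstS m hmS (fun hh => hm2 hh.symm)
      by_cases hlm : last < m
      · -- then last < x.2 < m
        have hx2b : last < x.2 ∧ x.2 < m := by unfold relI at hfm; omega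
        rw [if_pos hlm, if_pos hx2b.2]
        have hcon : ((((R.filter (fun y => y.1 == rm)).map (·.2)).filter (fun i => i != x.2)).filter
              (fun i => decide (last < i ∧ i ≤ m))) =
            ((((R.filter (fun y => y.1 == rm)).map (·.2)).filter (fun i => i != x.2)).filter
              (fun i => decide (x.2 < i ∧ i ≤ m))) := by
          refine List.filter_congr ?_
          intro i hi
          have hrel := hrelS' i hi
          unfold relI at hrel
          exact decide_eq_decide.mpr (by omega)
        rw [len_split (fun i => decide (last < i ∧ i ≤ m)), hcon,
          if_pos (by simp only [decide_eq_true_eq]; omega)]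
        push_cast
        ring
      · rw [if_neg hlm]
        have hx2b : (last < x.2 ∧ m ≤ last) ∨ (x.2 ≤ last ∧ x.2 < m) := by
          unfold relI at hfm; omega
        rcases hx2b with ⟨h1, h2⟩ | ⟨h1, h2⟩
        · -- last < x.2 and m on the wrapped side
          rw [if_neg (by omega)]
          have hcon : ((((R.filter (fun y => y.1 == rm)).map (·.2)).filter (fun i => i != x.2)).filter
                (fun i => decide (last < i))) =
              ((((R.filter (fun y => y.1 == rm)).map (·.2)).filter (fun i => i != x.2)).filter
                (fun i => decide (x.2 < i))) := by
            refine List.filter_congr ?_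
            intro i hi
            have hrel := hrelS' i hi
            unfold relI at hrel
            exact decide_eq_decide.mpr (by omega)
          rw [len_split (fun i => decide (last < i)), hcon,
            if_pos (by simp only [decide_eq_true_eq]; omega)]
          rw [len_split (fun i => decide (i ≤ m)),
            if_neg (by simp only [decide_eq_true_eq]; omega)]
          push_cast
          ring
        · -- x.2 ≤ last, everyone left is on the wrapped side
          rw [if_pos h2]
          have hall : ∀ i ∈ ((R.filter (fun y => y.1 == rm)).map (·.2)).filter
              (fun i => i != x.2), i ≤ last ∧ x.2 < i := by
            intro i hi
            have hrel := hrelS' i hi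
            unfold relI at hrel
            omega
          have hz1 : ((((R.filter (fun y => y.1 == rm)).map (·.2)).filter (fun i => i != x.2)).filter
              (fun i => decide (last < i))).length = 0 := by
            rw [List.length_eq_zero_iff, List.filter_eq_nil_iff]
            intro i hi
            have := hall i hi
            simp only [decide_eq_true_eq]
            omega
          have hcon : ((((R.filter (fun y => y.1 == rm)).map (·.2)).filter (fun i => i != x.2)).filter
                (fun i => decide (i ≤ m))) =
              ((((R.filter (fun y => y.1 == rm)).map (·.2)).filter (fun i => i != x.2)).filter
                (fun i => decide (x.2 < i ∧ i ≤ m))) := by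
            refine List.filter_congr ?_
            intro i hi
            have := hall i hi
            exact decide_eq_decide.mpr (by omega)
          rw [len_split (fun i => decide (last < i)), hz1,
            if_neg (by simp only [decide_eq_true_eq]; omega)]
          rw [len_split (fun i => decide (i ≤ m)), hcon,
            if_pos (by simp only [decide_eq_true_eq]; omega)]
          push_cast
          ring

-- a patient index that never occurs: the queue fully drains, one patient per round
theorem count_all (n : Nat) : ∀ {R : List (Int × Int)} {m last : Int},
    R.length ≤ n → sortedIdx R → (∀ y ∈ R, y.2 ≠ m) →
    count R last m = (R.length : Int) := by
  induction n with
  | zero =>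
    intro R m last hn hs hall
    have hR : R = [] := List.eq_nil_of_length_eq_zero (by omega)
    subst hR
    rw [count_nil]
    rfl
  | succ n ih =>
    intro R m last hn hs hall
    by_cases hR : R = []
    · subst hR
      rw [count_nil]
      rfl
    · obtain ⟨u, x, v, hd, hsplit, hu, hxM, hxR, hfirst, hrot⟩ := first_decomp hs hR last
      rw [count_cons hd, if_neg (hall x hxR)]
      have hlen' : (R.erase x).length ≤ n := by
        have := List.length_erase_of_mem hxR
        have := List.length_pos_of_mem hxR
        omega
      rw [ih hlen' (List.Pairwise.erase x hs)
        (fun y hy => hall y (List.mem_of_mem_erase hy))]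
      have h1 := List.length_erase_of_mem hxR
      have h2 := List.length_pos_of_mem hxR
      push_cast [h1]
      omega

theorem loopB_spec (E : List (Int × Int)) (bkts : PySem.Dict Int (List Int)) (m rm : Int)
    (hsE : sortedIdx E)
    (hb : ∀ L, bkts.getD L [] = (E.filter (fun y => y.1 == L)).map (·.2))
    (hmRisk : ∀ y ∈ E, y.2 = m → y.1 = rm)
    (hkm : (rm, m) ∈ E) :
    ∀ (ks : List Int) (a last : Int), ks.Pairwise (· > ·) → rm ∈ ks →
      (∀ k ∈ ks, ∃ y ∈ E, y.1 = k) →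
      loopB ks bkts rm m a last = a + count (E.filter (fun y => decide (y.1 ∈ ks))) last m := by
  intro ks
  induction ks with
  | nil => intro a last _ hrm _; cases hrm
  | cons k kt ih =>
    intro a last hdesc hrm hkex
    obtain ⟨hk_gt, hdesc'⟩ := List.pairwise_cons.mp hdesc
    have hsR : sortedIdx (E.filter (fun y => decide (y.1 ∈ k :: kt))) := hsE.filter _
    have hSS : (E.filter (fun y => decide (y.1 ∈ k :: kt))).filter (fun y => y.1 == k)
        = E.filter (fun y => y.1 == k) := by
      rw [List.filter_filter]
      refine List.filter_congr ?_
      intro y hy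
      by_cases hyk : y.1 = k <;> simp [hyk]
    have hRR : (E.filter (fun y => decide (y.1 ∈ k :: kt))).filter (fun y => y.1 != k)
        = E.filter (fun y => decide (y.1 ∈ kt)) := by
      rw [List.filter_filter]
      refine List.filter_congr ?_
      intro y hy
      have hknotin : k ∉ kt := fun hh => lt_irrefl k (hk_gt k hh)
      by_cases hyk : y.1 = k
      · simp [hyk, hknotin]
      · by_cases hykt : y.1 ∈ kt <;> simp [hyk, hykt]
    simp only [loopB]
    rw [hb k]
    by_cases hrmk : rm < k
    · rw [if_pos hrmk]
      obtain ⟨yk, hykE, hykk⟩ := hkex k List.mem_cons_self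
      have hcl := count_level (n := (E.filter (fun y => decide (y.1 ∈ k :: kt))).length)
        (last := last) (m := m)
        (le_refl _) hsR
        ⟨yk, List.mem_filter.mpr ⟨hykE, by simp [hykk]⟩, hykk⟩
        (fun y hy => by
          have h1 := (List.mem_filter.mp hy).2
          simp only [decide_eq_true_eq] at h1
          rcases List.mem_cons.mp h1 with h | h
          · omega
          · exact le_of_lt (hk_gt _ h))
        (fun y hy hyk hym => by
          have h1 : y ∈ E := (List.mem_filter.mp hy).1
          have := hmRisk y h1 hym
          omega)
      rw [hcl, hSS, hRR]
      have hrmkt : rm ∈ kt := by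
        rcases List.mem_cons.mp hrm with h | h
        · omega
        · exact h
      rw [ih (a + ((E.filter (fun y => y.1 == k)).map (·.2)).length)
        (endPtrB ((E.filter (fun y => y.1 == k)).map (·.2)) last) hdesc' hrmkt
        (fun j hj => hkex j (List.mem_cons_of_mem _ hj))]
      ring
    · rw [if_neg hrmk]
      have hrm_eq : rm = k := by
        rcases List.mem_cons.mp hrm with h | h
        · exact h
        · exact absurd (hk_gt rm h) (by omega)
      subst hrm_eq
      have hcf := count_final (n := (E.filter (fun y => decide (y.1 ∈ rm :: kt))).length)
        (last := last)
        (le_refl _) hsR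
        (fun y hy => by
          have h1 := (List.mem_filter.mp hy).2
          simp only [decide_eq_true_eq] at h1
          rcases List.mem_cons.mp h1 with h | h
          · omega
          · exact le_of_lt (hk_gt _ h))
        (List.mem_filter.mpr ⟨hkm, by simp⟩)
      rw [hcf, hSS]
      by_cases hlm : last < m
      · rw [if_pos hlm, if_pos hlm]
      · rw [if_neg hlm, if_neg hlm]
        ring

-- ===== VERDICT (by name: the statement is the Claim_ definition above) =====
theorem solve_spec : Claim_equal_solve := by
  intro n m risks _
  unfold Spec_solve
  set E := (PySem.List.enumerate risks).map (fun p => (p.2, p.1)) with hEdef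
  have hsE : sortedIdx E := by
    rw [hEdef]
    exact List.pairwise_map.mpr
      ((PySem.List.pairwise_lt_enumerate risks 0).imp (fun h => h))
  have hElen : E.length = risks.length := by
    rw [hEdef, List.length_map, PySem.List.length_enumerate]
  have hEidx : ∀ y ∈ E, 0 ≤ y.2 ∧ y.2 < (risks.length : Int) := by
    intro y hy
    rw [hEdef, List.mem_map] at hy
    obtain ⟨p, hp, rfl⟩ := hy
    rw [PySem.List.mem_enumerate_iff] at hp
    obtain ⟨k, hk, rfl⟩ := hp
    simp
    omega
  have hrotE : rotA ((risks.length : Int) - 1) E = E := by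
    unfold rotA
    have hz1 : E.filter (fun y => decide ((risks.length : Int) - 1 < y.2)) = [] := by
      rw [List.filter_eq_nil_iff]
      intro y hy
      have := hEidx y hy
      simp only [decide_eq_true_eq]
      omega
    have hz2 : E.filter (fun y => !decide ((risks.length : Int) - 1 < y.2)) = E := by
      rw [List.filter_eq_self]
      intro y hy
      have := hEidx y hy
      simp only [Bool.not_eq_eq_eq_not, Bool.not_true, decide_eq_false_iff_not]
      omega
    rw [hz1, hz2, List.nil_append]
  have hA : solve n m risks = count E ((risks.length : Int) - 1) m := by
    unfold solve
    rw [← hEdef]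
    have h2 := outerA_count E.length E (le_refl _) hsE ((risks.length : Int) - 1) m 0
    rw [hrotE] at h2
    rw [hElen] at h2
    rw [h2, zero_add]
  by_cases hpre : 0 ≤ m ∧ m < (risks.length : Int)
  case neg =>
    have hall : ∀ y ∈ E, y.2 ≠ m := by
      intro y hy
      have := hEidx y hy
      omega
    rw [hA, count_all E.length (le_refl _) hsE hall, hElen]
    unfold solve_alt
    rw [if_neg hpre]
  case pos =>
  obtain ⟨h0, h1⟩ := hpre
  have hk : m.toNat < risks.length := by omega
  have hrmval : (PySem.List.pyGet? risks m).getD 0 = risks[m.toNat] := by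
    simp [PySem.List.pyGet?, PySem.List.pyIdx?, h0, h1]
  have hmapE : E.map (fun y => y.1) = risks := by
    rw [hEdef, List.map_map]
    have : ((fun y : Int × Int => y.1) ∘ fun p : Int × Int => (p.2, p.1)) = (fun p => p.2) := by
      funext p; rfl
    rw [this]
    exact PySem.List.map_snd_enumerate risks 0
  have hmint : ((m.toNat : Int)) = m := by omega
  have hkmE' : ((risks[m.toNat] : Int), m) ∈ E := by
    rw [hEdef, List.mem_map]
    refine ⟨((m.toNat : Int), risks[m.toNat]), ?_, by rw [hmint]⟩
    rw [PySem.List.mem_enumerate_iff]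
    exact ⟨m.toNat, hk, by simp⟩
  have hmRisk : ∀ y ∈ E, y.2 = m → y.1 = risks[m.toNat] := by
    intro y hy hym
    rw [hEdef, List.mem_map] at hy
    obtain ⟨p, hp, rfl⟩ := hy
    rw [PySem.List.mem_enumerate_iff] at hp
    obtain ⟨j, hj, rfl⟩ := hp
    simp only at hym ⊢
    have : j = m.toNat := by omega
    subst this
    rfl
  set bkts := bucketsB risks with hbdef
  have hbfold : bkts = E.foldl
      (fun d p => d.modify p.1 [] (fun l => l ++ [p.2])) PySem.Dict.empty := by
    rw [hbdef]
    unfold bucketsB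
    rw [hEdef, List.foldl_map]
  have hb : ∀ L, bkts.getD L [] = (E.filter (fun y => y.1 == L)).map (·.2) := by
    intro L
    rw [hbfold, PySem.Dict.getD_foldl_modify_append, PySem.Dict.getD_empty, List.nil_append]
  have hkeys : bkts.keys = PySem.Set.ofList risks := by
    rw [hbfold,
      PySem.Dict.keys_foldl_modify_key E (fun y => y.1) [] (fun d y => (fun l => l ++ [y.2])),
      PySem.Dict.keys_empty, hmapE]
    rfl
  set ks0 := PySem.List.sorted bkts.keys (fun x => x) true with hksdef
  have hdesc : ks0.Pairwise (· > ·) := by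
    have hle := PySem.List.sorted_pairwise_rev bkts.keys (fun x => x)
    have hnd0 : bkts.keys.Nodup := by
      rw [hkeys]; exact PySem.Set.nodup_ofList risks
    have hnd : ks0.Nodup :=
      ((PySem.List.sorted_perm bkts.keys (fun x => x) true).nodup_iff).mpr hnd0
    exact (hle.and hnd).imp (fun hab => lt_of_le_of_ne hab.1 (Ne.symm hab.2))
  have hmemks : ∀ j, j ∈ ks0 ↔ j ∈ risks := by
    intro j
    rw [hksdef, PySem.List.mem_sorted, hkeys, PySem.Set.mem_ofList]
  have hrmks : (risks[m.toNat] : Int) ∈ ks0 := (hmemks _).mpr (List.getElem_mem hk)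
  have hkex : ∀ j ∈ ks0, ∃ y ∈ E, y.1 = j := by
    intro j hj
    have hj2 : j ∈ E.map (fun y => y.1) := by
      rw [hmapE]; exact (hmemks j).mp hj
    obtain ⟨y, hy, hy1⟩ := List.mem_map.mp hj2
    exact ⟨y, hy, hy1⟩
  have hfull : E.filter (fun y => decide (y.1 ∈ ks0)) = E := by
    rw [List.filter_eq_self]
    intro y hy
    simp only [decide_eq_true_eq]
    exact (hmemks y.1).mpr (by rw [← hmapE]; exact List.mem_map_of_mem hy)
  have hB : solve_alt n m risks = count E ((risks.length : Int) - 1) m := by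
    unfold solve_alt
    rw [if_pos ⟨h0, h1⟩, ← hbdef, hrmval]
    rw [loopB_spec E bkts m (risks[m.toNat] : Int) hsE hb hmRisk hkmE' ks0 0
      ((risks.length : Int) - 1) hdesc hrmks hkex]
    rw [hfull]
    ring
  rw [hA, hB]
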